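-- pv_equiv track=rewrite | github.com/ohmyzsh/ohmyzsh | plugins/aliases/cheatsheet.py | cheatsheet
-- ===== SOURCE A (Python) =====
-- import itertools
--
-- def parse(line):
--     left = line[0:line.find('=')].strip()
--     right = line[line.find('=')+1:].strip('\'"\n ')
--     try:
--         cmd = next(part for part in right.split() if len([char for char in '=<>' if char in part])==0)
--     except StopIteration:
--         cmd = right
--     return (left, right, cmd)
--
-- def cheatsheet(lines):
--     exps = [ parse(line) for line in lines ]
--     exps.sort(key=lambda exp:exp[2])
--     cheatsheet = {'_default': []}
--     for key, group in itertools.groupby(exps, lambda exp:exp[2]):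
--         group_list = [ item for item in group ]
--         if len(group_list)==1:
--             target_aliases = cheatsheet['_default']
--         else:
--             if key not in cheatsheet:
--                 cheatsheet[key] = []
--             target_aliases = cheatsheet[key]
--         target_aliases.extend(group_list)
--     return cheatsheet
-- ===== SOURCE B (Python) =====
-- def parse(line):
--     left = line[0:line.find('=')].strip()
--     right = line[line.find('=')+1:].strip('\'"\n ')
--     try:
--         cmd = next(part for part in right.split() if len([char for char in '=<>' if char in part])==0)
--     except StopIteration:
--         cmd = right
--     return (left, right, cmd)
--
-- def cheatsheet(lines):
--     exps = sorted((parse(line) for line in lines), key=lambda exp: exp[2])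
--     counts = {}
--     for exp in exps:
--         counts[exp[2]] = counts.get(exp[2], 0) + 1
--     result = {'_default': []}
--     for exp in exps:
--         if counts[exp[2]] == 1:
--             result['_default'].append(exp)
--         else:
--             result.setdefault(exp[2], []).append(exp)
--     return result
-- ===== Notes on version B (the rewrite author's own statement) =====
-- stated objective: alternative
-- what changed: Replaces itertools.groupby over the sorted alias list by a frequency table built in one pass plus a single flat appending pass that routes each alias to '_default' or its command bucket.
import Mathlib
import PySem

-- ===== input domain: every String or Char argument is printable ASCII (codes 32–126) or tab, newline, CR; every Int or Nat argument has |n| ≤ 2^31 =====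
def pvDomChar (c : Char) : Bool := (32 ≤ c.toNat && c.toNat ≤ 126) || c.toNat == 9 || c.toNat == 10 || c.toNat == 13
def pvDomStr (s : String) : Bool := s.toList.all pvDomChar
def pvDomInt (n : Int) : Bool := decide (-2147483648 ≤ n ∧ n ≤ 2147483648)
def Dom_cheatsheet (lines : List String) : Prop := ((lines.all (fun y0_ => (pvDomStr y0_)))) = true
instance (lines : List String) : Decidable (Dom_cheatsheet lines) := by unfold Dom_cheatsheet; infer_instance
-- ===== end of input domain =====

-- B replaces itertools.groupby over the sorted aliases by a frequency table plus one flat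
-- appending pass (objective: alternative decomposition, same cost); return values proved equal.

-- ===== PORT A =====
-- parse(line), shared helper of both Pythons (B keeps parse unchanged)
def pvParse (line : String) : String × String × String :=
  let f := PySem.Str.find line "="
  let left := PySem.Str.strip (PySem.Str.slice line (some 0) (some f))
  let right := PySem.Str.stripChars (PySem.Str.slice line (some (f + 1)) none) "'\"\n "
  let cmd :=
    match (PySem.Str.split₀ right).find? (fun p =>
        ((("=<>".toList).filter (fun c => PySem.Str.isIn (String.ofList [c]) p)).length == 0)) with
    | some p => p
    | none => right
  (left, right, cmd)

-- the `for key, group in itertools.groupby(exps, …)` loop of A, group by group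
def pvGroupLoop : List (String × String × String) →
    PySem.Dict String (List (String × String × String)) →
    PySem.Dict String (List (String × String × String))
  | [], d => d
  | e :: rest, d =>
    let key := e.2.2
    let group := e :: rest.takeWhile (fun x => x.2.2 == key)
    let rest' := rest.dropWhile (fun x => x.2.2 == key)
    let d' :=
      if group.length == 1 then
        d.insert "_default" (d.getD "_default" [] ++ group)
      else
        let d₁ := if d.contains key then d else d.insert key []
        d₁.insert key (d₁.getD key [] ++ group)
    pvGroupLoop rest' d'
termination_by l _ => l.length
decreasing_by
  simp only [List.length_cons]
  exact Nat.lt_succ_of_le (List.length_dropWhile_le _ _)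

def cheatsheet (lines : List String) : List (String × List (String × String × String)) :=
  let exps := PySem.List.sorted (lines.map pvParse) (fun e => e.2.2) false
  (pvGroupLoop exps (PySem.Dict.ofList [("_default", [])])).items

-- ===== PORT B =====
def cheatsheet_alt (lines : List String) : List (String × List (String × String × String)) :=
  let exps := PySem.List.sorted (lines.map pvParse) (fun e => e.2.2) false
  let counts := exps.foldl (fun d e => d.insert e.2.2 (d.getD e.2.2 0 + 1))
    (PySem.Dict.empty : PySem.Dict String Int)
  let res := exps.foldl (fun d e =>
      if counts.getD e.2.2 0 == 1 then d.modify "_default" [] (· ++ [e])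
      else d.modify e.2.2 [] (· ++ [e]))
    (PySem.Dict.ofList [("_default", [])])
  res.items

-- ===== PRECONDITION & SPEC =====
def Spec_cheatsheet (lines : List String) (out : List (String × List (String × String × String))) : Prop := out = cheatsheet_alt lines
instance (lines : List String) (out : List (String × List (String × String × String))) : Decidable (Spec_cheatsheet lines out) := by unfold Spec_cheatsheet; infer_instance

-- ===== CLAIM (what is proved, stated in full; the proofs are below) =====
def Claim_equal_cheatsheet : Prop := ∀ (lines : List String), Dom_cheatsheet lines → Spec_cheatsheet lines (cheatsheet lines)

-- ===== LEMMAS AND PROOFS =====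

-- B's per-element step, with the count table abstracted as a function
def pvBStep (cnt : String → Int)
    (d : PySem.Dict String (List (String × String × String)))
    (e : String × String × String) :
    PySem.Dict String (List (String × String × String)) :=
  if cnt e.2.2 == 1 then d.modify "_default" [] (· ++ [e]) else d.modify e.2.2 [] (· ++ [e])

theorem pv_modify_eq_insert (d : PySem.Dict String (List (String × String × String)))
    (k : String) (f : List (String × String × String) → List (String × String × String)) :
    d.modify k [] f = d.insert k (f (d.getD k [])) := rfl

theorem pv_fold_run_multi (cnt : String → Int) (k : String) :
    ∀ (gs : List (String × String × String)) (x : String × String × String)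
      (d : PySem.Dict String (List (String × String × String))),
      (∀ y ∈ x :: gs, y.2.2 = k) → (∀ y ∈ x :: gs, cnt y.2.2 ≠ 1) →
      (x :: gs).foldl (pvBStep cnt) d = d.insert k (d.getD k [] ++ (x :: gs)) := by
  intro gs
  induction gs with
  | nil =>
    intro x d hall hc
    have hx : x.2.2 = k := hall x (by simp)
    have hcx : (cnt x.2.2 == 1) = false := by simpa [beq_iff_eq] using hc x (by simp)
    simp [pvBStep, pv_modify_eq_insert, hx]
    intro h1
    rw [hx, h1] at hcx
    simp at hcx
  | cons y t ih =>
    intro x d hall hc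
    have hx : x.2.2 = k := hall x (by simp)
    have hcx : (cnt x.2.2 == 1) = false := by simpa [beq_iff_eq] using hc x (by simp)
    have step : pvBStep cnt d x = d.insert k (d.getD k [] ++ [x]) := by
      simp [pvBStep, pv_modify_eq_insert, hx]
      intro h1
      rw [hx, h1] at hcx
      simp at hcx
    have hall' : ∀ z ∈ y :: t, z.2.2 = k := fun z hz => hall z (List.mem_cons_of_mem _ hz)
    have hc' : ∀ z ∈ y :: t, cnt z.2.2 ≠ 1 := fun z hz => hc z (List.mem_cons_of_mem _ hz)
    rw [List.foldl_cons, step, ih y _ hall' hc',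
        PySem.Dict.getD_insert_self, PySem.Dict.insert_insert_self, List.append_assoc]
    simp

theorem pv_run_keys_ne (k : String) :
    ∀ (rest : List (String × String × String)),
      rest.Pairwise (fun a b => a.2.2 ≤ b.2.2) → (∀ y ∈ rest, k ≤ y.2.2) →
      ∀ y ∈ rest.dropWhile (fun x => x.2.2 == k), y.2.2 ≠ k := by
  intro rest
  induction rest with
  | nil => intro _ _ y hy; simp at hy
  | cons a t ih =>
    intro hpw hge
    by_cases ha : a.2.2 = k
    · rw [List.dropWhile_cons_of_pos (by simp [ha])]
      refine ih (List.pairwise_cons.mp hpw).2 (fun y hy => ?_)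
      exact le_trans (hge a (by simp)) ((List.pairwise_cons.mp hpw).1 y hy)
    · rw [List.dropWhile_cons_of_neg (by simp [ha])]
      intro y hy
      rcases List.mem_cons.mp hy with rfl | hyt
      · exact ha
      · have h1 : k ≤ a.2.2 := hge a (by simp)
        have h2 : a.2.2 ≤ y.2.2 := (List.pairwise_cons.mp hpw).1 y hyt
        intro hyk
        rw [hyk] at h2
        exact ha (le_antisymm h2 h1)

theorem pv_main (cnt : String → Int) :
    ∀ (n : ℕ) (l : List (String × String × String)), l.length = n →
      ∀ d, l.Pairwise (fun a b => a.2.2 ≤ b.2.2) →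
      (∀ e ∈ l, cnt e.2.2 = ((l.map (fun y => y.2.2)).count e.2.2 : Int)) →
      pvGroupLoop l d = l.foldl (pvBStep cnt) d := by
  intro n
  induction n using Nat.strong_induction_on with
  | _ n ih =>
    intro l hlen d hpw hcnt
    rcases l with _ | ⟨e, rest⟩
    · simp [pvGroupLoop]
    · have hge : ∀ y ∈ rest, e.2.2 ≤ y.2.2 := (List.pairwise_cons.mp hpw).1
      have hpwr : rest.Pairwise (fun a b => a.2.2 ≤ b.2.2) := (List.pairwise_cons.mp hpw).2
      have hsplit : rest = rest.takeWhile (fun x => x.2.2 == e.2.2) ++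
          rest.dropWhile (fun x => x.2.2 == e.2.2) := (List.takeWhile_append_dropWhile).symm
      have htw : ∀ y ∈ rest.takeWhile (fun x => x.2.2 == e.2.2), y.2.2 = e.2.2 := by
        intro y hy
        have := List.mem_takeWhile_imp hy
        simpa [beq_iff_eq] using this
      have hdw : ∀ y ∈ rest.dropWhile (fun x => x.2.2 == e.2.2), y.2.2 ≠ e.2.2 :=
        pv_run_keys_ne e.2.2 rest hpwr hge
      have hgall : ∀ y ∈ e :: rest.takeWhile (fun x => x.2.2 == e.2.2), y.2.2 = e.2.2 := by
        intro y hy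
        rcases List.mem_cons.mp hy with rfl | hy'
        · rfl
        · exact htw y hy'
      -- the count of the current key is the length of its run
      have hrun : ((e :: rest).map (fun y => y.2.2)).count e.2.2 =
          (e :: rest.takeWhile (fun x => x.2.2 == e.2.2)).length := by
        conv_lhs => rw [hsplit]
        rw [show (e :: (rest.takeWhile (fun x => x.2.2 == e.2.2) ++
              rest.dropWhile (fun x => x.2.2 == e.2.2))) =
            (e :: rest.takeWhile (fun x => x.2.2 == e.2.2)) ++
              rest.dropWhile (fun x => x.2.2 == e.2.2) from rfl]
        rw [List.map_append, List.count_append]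
        have h1 : ((e :: rest.takeWhile (fun x => x.2.2 == e.2.2)).map
            (fun y => y.2.2)).count e.2.2 =
            (e :: rest.takeWhile (fun x => x.2.2 == e.2.2)).length := by
          rw [List.count_eq_length.mpr, List.length_map]
          intro b hb
          rcases List.mem_map.mp hb with ⟨y, hy, rfl⟩
          exact (hgall y hy).symm
        have h2 : ((rest.dropWhile (fun x => x.2.2 == e.2.2)).map
            (fun y => y.2.2)).count e.2.2 = 0 := by
          rw [List.count_eq_zero]
          intro hmem
          rcases List.mem_map.mp hmem with ⟨y, hy, hyk⟩
          exact hdw y hy hyk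
        rw [h1, h2]
        omega
      have hcur : cnt e.2.2 = ((e :: rest.takeWhile (fun x => x.2.2 == e.2.2)).length : Int) := by
        rw [hcnt e (List.mem_cons_self), hrun]
      -- the recursive call's hypotheses
      have hlen' : (rest.dropWhile (fun x => x.2.2 == e.2.2)).length < n := by
        have := List.length_dropWhile_le (fun x => x.2.2 == e.2.2) rest
        simp only [← hlen, List.length_cons]
        omega
      have hpw' : (rest.dropWhile (fun x => x.2.2 == e.2.2)).Pairwise
          (fun a b => a.2.2 ≤ b.2.2) :=
        List.Pairwise.sublist (List.dropWhile_sublist _) hpwr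
      have hcnt' : ∀ e' ∈ rest.dropWhile (fun x => x.2.2 == e.2.2),
          cnt e'.2.2 = (((rest.dropWhile (fun x => x.2.2 == e.2.2)).map
            (fun y => y.2.2)).count e'.2.2 : Int) := by
        intro e' he'
        have hmem : e' ∈ e :: rest := by
          rw [hsplit]
          exact List.mem_cons_of_mem _ (List.mem_append_right _ he')
        rw [hcnt e' hmem]
        congr 1
        conv_lhs => rw [hsplit]
        rw [show (e :: (rest.takeWhile (fun x => x.2.2 == e.2.2) ++
              rest.dropWhile (fun x => x.2.2 == e.2.2))) =
            (e :: rest.takeWhile (fun x => x.2.2 == e.2.2)) ++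
              rest.dropWhile (fun x => x.2.2 == e.2.2) from rfl]
        rw [List.map_append, List.count_append]
        have h0 : ((e :: rest.takeWhile (fun x => x.2.2 == e.2.2)).map
            (fun y => y.2.2)).count e'.2.2 = 0 := by
          rw [List.count_eq_zero]
          intro hmem'
          rcases List.mem_map.mp hmem' with ⟨y, hy, hyk⟩
          exact hdw e' he' (hyk ▸ hgall y hy)
        rw [h0, Nat.zero_add]
      -- one step of A's loop, then one run of B's fold
      rw [pvGroupLoop]
      simp only []
      have hfoldsplit : (e :: rest).foldl (pvBStep cnt) d =
          (rest.dropWhile (fun x => x.2.2 == e.2.2)).foldl (pvBStep cnt)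
            ((e :: rest.takeWhile (fun x => x.2.2 == e.2.2)).foldl (pvBStep cnt) d) := by
        conv_lhs => rw [show (e :: rest) =
            (e :: rest.takeWhile (fun x => x.2.2 == e.2.2)) ++
              rest.dropWhile (fun x => x.2.2 == e.2.2) by rw [List.cons_append, ← hsplit]]
        rw [List.foldl_append]
      rw [hfoldsplit]
      rcases htws : rest.takeWhile (fun x => x.2.2 == e.2.2) with _ | ⟨x, tws⟩
      · -- run of length 1
        rw [htws] at hcur hgall ⊢
        have hb : (e :: ([] : List (String × String × String))).foldl (pvBStep cnt) d =
            d.insert "_default" (d.getD "_default" [] ++ [e]) := by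
          have hcond : (cnt e.2.2 == 1) = true := by
            simp [hcur]
          simp [pvBStep, hcond, pv_modify_eq_insert]
        rw [hb]
        rw [if_pos (by simp)]
        exact ih _ hlen' _ rfl _ hpw' hcnt'
      · -- run of length ≥ 2
        rw [htws] at hcur hgall ⊢
        have hne1 : ∀ y ∈ e :: x :: tws, cnt y.2.2 ≠ 1 := by
          intro y hy
          rw [hgall y hy, hcur]
          intro hcontra
          have : (2 : Int) ≤ ((e :: x :: tws).length : Int) := by
            simp [List.length_cons]
            omega
          omega
        have hb := pv_fold_run_multi cnt e.2.2 (x :: tws) e d hgall hne1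
        rw [hb]
        have ha : (if (e :: x :: tws).length == 1 then
              d.insert "_default" (d.getD "_default" [] ++ (e :: x :: tws))
            else
              let d₁ := if d.contains e.2.2 then d else d.insert e.2.2 []
              d₁.insert e.2.2 (d₁.getD e.2.2 [] ++ (e :: x :: tws))) =
            d.insert e.2.2 (d.getD e.2.2 [] ++ (e :: x :: tws)) := by
          rw [if_neg (by simp)]
          by_cases hcont : d.contains e.2.2
          · simp only [hcont, if_true]
          · simp only [hcont, Bool.false_eq_true, if_false]
            rw [PySem.Dict.getD_insert_self, PySem.Dict.insert_insert_self,
              PySem.Dict.getD_of_not_contains _ _ (by simpa using hcont), List.nil_append]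
        rw [ha]
        exact ih _ hlen' _ rfl _ hpw' hcnt'

-- ===== VERDICT (by name: the statement is the Claim_ definition above) =====
theorem cheatsheet_spec : Claim_equal_cheatsheet := by
  intro lines _
  show cheatsheet lines = cheatsheet_alt lines
  unfold cheatsheet cheatsheet_alt
  simp only []
  have hcnt : ∀ v, ((PySem.List.sorted (lines.map pvParse) (fun e => e.2.2) false).foldl
      (fun d e => d.insert e.2.2 (d.getD e.2.2 0 + 1))
      (PySem.Dict.empty : PySem.Dict String Int)).getD v 0 =
      (((PySem.List.sorted (lines.map pvParse) (fun e => e.2.2) false).map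
        (fun y => y.2.2)).count v : Int) := by
    intro v
    rw [show (PySem.List.sorted (lines.map pvParse) (fun e => e.2.2) false).foldl
        (fun d e => d.insert e.2.2 (d.getD e.2.2 0 + 1))
        (PySem.Dict.empty : PySem.Dict String Int) =
        ((PySem.List.sorted (lines.map pvParse) (fun e => e.2.2) false).map
          (fun y => y.2.2)).foldl (fun d x => d.insert x (d.getD x 0 + 1))
        (PySem.Dict.empty : PySem.Dict String Int) from (List.foldl_map (f := fun y : String × String × String => y.2.2)
          (g := fun (d : PySem.Dict String Int) x => d.insert x (d.getD x 0 + 1))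
          (l := PySem.List.sorted (lines.map pvParse) (fun e => e.2.2) false)
          (init := PySem.Dict.empty)).symm]
    rw [PySem.Dict.getD_foldl_insert_add_one]
    simp
  exact congrArg PySem.Dict.items
    (pv_main (fun v => ((PySem.List.sorted (lines.map pvParse) (fun e => e.2.2) false).foldl
        (fun d e => d.insert e.2.2 (d.getD e.2.2 0 + 1))
        (PySem.Dict.empty : PySem.Dict String Int)).getD v 0) _ _ rfl _
      (PySem.List.sorted_pairwise (lines.map pvParse) (fun e => e.2.2))
      (fun e _ => hcnt e.2.2))
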